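/- GENERATED by mk_final_copies.py from the proof of the farm's unit `draw_line` (farm:draw_line.1: Lemmas.lean) as the
   re-elaboration sweep compiled it — do not edit. -/
import Asan.CheckWalk
import Vorbis.Spec.Units.draw_line

open X86 X86.User Asan Vorbis

namespace Vorbis.Spec.draw_line

/-- The quotient of a sign-extended 32-bit dividend that is not `INT_MIN` fits 32 bits, whatever the divisor
(a closed bit-vector fact: the SAT solver needs about ten seconds for the 64-bit divider). -/
theorem idiv_fits (a d : BitVec 32) (ha : a ≠ 0x80000000#32) :
    BitVec.signExtend 64 (BitVec.setWidth 32
        (((if a.msb = true then BitVec.allOnes 32 else 0) ++ a).sdiv (BitVec.signExtend 64 d))) =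
      ((if a.msb = true then BitVec.allOnes 32 else 0) ++ a).sdiv (BitVec.signExtend 64 d) := by
  bv_decide (config := { timeout := 600 })

/-- `cdq ; idiv r32` of a dividend that is not `INT_MIN` by a non-zero divisor does not raise #DE (0x10875d, C line 2088). -/
theorem idiv_cdq_some (a d : BitVec 32) (hd : d ≠ 0) (ha : a ≠ 0x80000000#32) :
    Alu.div true (if a.msb = true then BitVec.allOnes 32 else 0) a d ≠ none := by
  unfold Alu.div
  simp only [bne_iff_ne, ne_eq, beq_iff_eq, ite_not, if_true, hd, if_false]
  rw [if_pos (idiv_fits a d ha)]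
  exact Option.some_ne_none _

/-- Two `int`s with different signed values have a non-zero 32-bit difference (the divisor `adx` of the `idiv`). -/
theorem sub_ne_zero32 (a b : BitVec 32) (h : a.toInt ≠ b.toInt) : a - b ≠ 0#32 := by
  intro h0
  apply h
  have e : a = b := by bv_decide
  rw [e]

/-- A 32-bit difference whose exact value is above `INT_MIN` is not `INT_MIN` (the dividend `dy` of the `idiv`). -/
theorem sub_ne_intMin (a b : BitVec 32) (h1 : -(2 : Int) ^ 31 < a.toInt - b.toInt) (h2 : a.toInt - b.toInt < 2 ^ 31) :
    a - b ≠ 0x80000000#32 := by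
  intro h0
  have e := congrArg BitVec.toNat h0
  rw [BitVec.toNat_sub] at e
  rw [BitVec.toInt_eq_toNat_cond, BitVec.toInt_eq_toNat_cond] at h1 h2
  have ha := a.isLt
  have hb := b.isLt
  have e8 : (0x80000000#32).toNat = 2147483648 := by decide
  rw [e8] at e
  split at h1 <;> split at h1 <;> omega

/-- A non-negative `int` as a number: below `2^31`, and its signed value is the number. -/
theorem nonneg32 (x : BitVec 32) (h : 0 ≤ x.toInt) : x.toNat < 2 ^ 31 ∧ x.toInt = (x.toNat : Int) := by
  have hx := x.isLt
  rw [BitVec.toInt_eq_toNat_cond] at h ⊢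
  split at h <;> omega

/-- **The address of `output[x]`** (`movsxd rax, r32 ; lea r, [p + rax*4]`, C lines 2097 and 2105) for `0 ≤ x0 ≤ x < m = min(x1, n)`,
and where the pixel lies: in the contract's window `output[x0 .. min(x1, n))` and in the live block `output[0 .. n)`. -/
theorem pixel_addr (p : Word) (x0 x n : BitVec 32) (m : Int) (h0 : 0 ≤ x0.toInt) (h1 : x0.toInt ≤ x.toInt)
    (h2 : x.toInt < m) (hm : m ≤ n.toInt) (hp : p.toNat + 4 * n.toInt.toNat ≤ 0xC00000) :
    (p + Word.ofBV (BitVec.signExtend 64 x) * 4).toNat = p.toNat + 4 * x.toNat ∧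
      x0.toInt.toNat ≤ x.toNat ∧ x.toNat + 1 ≤ m.toNat ∧ m.toNat ≤ n.toInt.toNat := by
  obtain ⟨hx, hxi⟩ := nonneg32 x (by omega)
  have hs := Vorbis.Spec.toNat_sext32 x hx
  have ha := Vorbis.Spec.add_mul4 p _ x.toNat hs (by omega)
  refine ⟨ha, ?_, ?_, ?_⟩
  · omega
  · omega
  · omega

/-- **The address of `inverse_db_table[y & 255]`** (`movzx r32, r12b ; lea rdi, [r*4 + 0x120680]`): the index is a byte. -/
theorem table_addr (b : BitVec 8) :
    (Word.ofBV (BitVec.zeroExtend 32 b) * 4 + 1181312).toNat = 1181312 + 4 * b.toNat := by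
  have hb := b.isLt
  have e4 : (4 : Word).toNat = 4 := rfl
  have ek : (1181312 : Word).toNat = 1181312 := rfl
  rw [UInt64.toNat_add, UInt64.toNat_mul, Vorbis.toNat_ofBV32, e4, ek]
  simp only [BitVec.zeroExtend, BitVec.toNat_setWidth]
  omega

/-- **`inverse_db_table[y & 255]` lies inside the table** (1024 bytes at 0x120680, SH5), whatever `y` is: the form of `h1`, `h2` of
`Vorbis.check_small_other` at the check sites 0x1087c4 and 0x10881a. -/
theorem table_in (b : BitVec 8) :
    1181312 ≤ (Word.ofBV (BitVec.zeroExtend 32 b) * 4 + 1181312).toNat ∧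
      (Word.ofBV (BitVec.zeroExtend 32 b) * 4 + 1181312).toNat + 4 ≤ 1181312 + 1024 := by
  have hb := b.isLt
  rw [table_addr]
  omega

/-- `add ebx, 1` below another `int` does not wrap (the loop counter `x < x1'`). -/
theorem toInt_add_one (x y : BitVec 32) (h : x.toInt < y.toInt) : (x + 1#32).toInt = x.toInt + 1 := by
  have hy := y.isLt
  have hx := x.isLt
  rw [BitVec.toInt_eq_toNat_cond] at h
  rw [BitVec.toInt_eq_toNat_cond y] at h
  rw [BitVec.toInt_eq_toNat_cond, BitVec.toInt_eq_toNat_cond x, BitVec.toNat_add]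
  have e1 : (1#32).toNat = 1 := by decide
  rw [e1]
  split at h <;> split at h <;> split <;> omega

/-- The dword read back from a stack slot is the 32-bit value stored there (`BitVec.ofNat 32 x.toNat`, the walker's form of a load). -/
theorem ofNat_toNat32 (x : BitVec 32) : BitVec.ofNat 32 x.toNat = x := by
  rw [BitVec.ofNat_toNat, BitVec.setWidth_eq]

/-- What `omega` needs to know of `min` (it takes `min a b` for an atom): both bounds and the case distinction. -/
theorem min_cases (a b : Int) : min a b ≤ a ∧ min a b ≤ b ∧ (min a b = a ∨ min a b = b) := by
  refine ⟨Int.min_le_left a b, Int.min_le_right a b, ?_⟩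
  rcases Int.le_total a b with h | h
  · exact Or.inl (Int.min_eq_left h)
  · exact Or.inr (Int.min_eq_right h)

/-- The same when the value went through a register (`mov [m32], ebp` of a zero-extended value): the walker's `% 2^32`. -/
theorem ofNat_toNat32_mod (x : BitVec 32) : BitVec.ofNat 32 (x.toNat % 4294967296) = x := by
  rw [Nat.mod_eq_of_lt x.isLt]
  exact ofNat_toNat32 x

/-- The walker's form of `lea ebx, [r14 + 1]` (0x1087db, `++x`): the 32-bit sum. -/
theorem lea_add_one (x : BitVec 32) : BitVec.setWidth 32 (Word.ofBV x + 1).toBitVec = x + 1#32 := by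
  apply BitVec.eq_of_toNat_eq
  have e1 : (1 : Word).toNat = 1 := rfl
  have e1' : (1#32).toNat = 1 := by decide
  have hx := x.isLt
  rw [BitVec.toNat_setWidth, UInt64.toNat_toBitVec, UInt64.toNat_add, Vorbis.toNat_ofBV32, e1, BitVec.toNat_add, e1']
  omega

end Vorbis.Spec.draw_line
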